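-- pv_equiv track=rewrite | github.com/1r0nw1ll/quantum-arithmetic-research | experiments/arto_ternary_logic_experiment.py | equivalent_bits_for_trits
-- ===== SOURCE A (Python) =====
-- def equivalent_bits_for_trits(trits: int) -> int:
--     """Smallest binary symbol count with at least the same state capacity."""
--     states = 3**trits
--     bits = 0
--     capacity = 1
--     while capacity < states:
--         bits += 1
--         capacity *= 2
--     return bits
-- ===== SOURCE B (Python) =====
-- def equivalent_bits_for_trits(trits: int) -> int:
--     """Smallest binary symbol count with at least the same state capacity."""
--     if trits <= 0:
--         return 0
--     return (3**trits - 1).bit_length()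
-- ===== Notes on version B (the rewrite author's own statement) =====
-- stated objective: faster
-- what changed: Replace the doubling while-loop, which repeatedly compares a growing big integer against the ternary state count, by a single bit_length call on the state count minus one.
import Mathlib
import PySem

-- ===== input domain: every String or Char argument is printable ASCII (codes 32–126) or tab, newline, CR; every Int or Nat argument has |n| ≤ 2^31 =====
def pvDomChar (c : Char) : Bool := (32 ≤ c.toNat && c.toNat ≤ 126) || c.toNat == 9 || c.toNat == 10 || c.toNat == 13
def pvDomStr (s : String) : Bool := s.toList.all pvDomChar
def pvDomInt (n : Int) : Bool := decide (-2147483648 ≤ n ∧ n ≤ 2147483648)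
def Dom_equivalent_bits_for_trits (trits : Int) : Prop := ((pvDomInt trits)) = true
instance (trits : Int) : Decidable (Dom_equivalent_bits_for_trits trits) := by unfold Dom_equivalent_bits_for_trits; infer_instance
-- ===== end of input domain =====

-- B replaces A's doubling loop by a single bit-length computation on 3^trits - 1 (faster).

-- ===== PORT A =====
-- the while loop: `while capacity < states: bits += 1; capacity *= 2`
-- (capacity starts at 1 and only doubles; the positivity hypothesis hc serves termination only)
def pvLoopA (states : Nat) (bits : Int) (capacity : Nat) (hc : 0 < capacity) : Int :=
  if capacity < states then pvLoopA states (bits + 1) (capacity * 2) (by omega) else bits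
termination_by states - capacity
decreasing_by omega

def equivalent_bits_for_trits (trits : Int) : Int :=
  -- Python: states = 3**trits.  For trits < 0 this is a float in (0, 1), so the loop
  -- condition `capacity < states` (i.e. 1 < states) is false at once and bits = 0 is
  -- returned; that branch is hand-ported exactly.  For trits ≥ 0, states = 3^trits : ℕ.
  if trits < 0 then 0
  else pvLoopA ((3 : Nat) ^ trits.toNat) 0 1 (by omega)

-- ===== PORT B =====
-- hand port of Python's int.bit_length (exact for n ≥ 0): count halvings until 0
def pvBitLen (n : Nat) (acc : Nat) : Nat :=
  if n = 0 then acc else pvBitLen (n / 2) (acc + 1)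
termination_by n
decreasing_by omega

def equivalent_bits_for_trits_alt (trits : Int) : Int :=
  if trits ≤ 0 then 0
  else (pvBitLen ((3 : Nat) ^ trits.toNat - 1) 0 : Int)

-- ===== PRECONDITION & SPEC =====
def Spec_equivalent_bits_for_trits (trits : Int) (out : Int) : Prop := out = equivalent_bits_for_trits_alt trits
instance (trits : Int) (out : Int) : Decidable (Spec_equivalent_bits_for_trits trits out) := by unfold Spec_equivalent_bits_for_trits; infer_instance

-- ===== CLAIM (what is proved, stated in full; the proofs are below) =====
def Claim_equal_equivalent_bits_for_trits : Prop := ∀ (trits : Int), Dom_equivalent_bits_for_trits trits → Spec_equivalent_bits_for_trits trits (equivalent_bits_for_trits trits)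

-- ===== LEMMAS AND PROOFS =====

-- the bit length of m ≥ 1 is one more than the bit length of m / 2
lemma pv_size_div_two {m : Nat} (hm : 1 ≤ m) : Nat.size m = Nat.size (m / 2) + 1 := by
  apply le_antisymm
  · rw [Nat.size_le, pow_succ]
    have h := Nat.lt_size_self (m / 2)
    omega
  · rcases Nat.eq_zero_or_pos (m / 2) with h0 | h0
    · have : Nat.size m ≥ 1 := Nat.size_pos.mpr hm
      simp [h0]
      omega
    · have hp : 0 < Nat.size (m / 2) := Nat.size_pos.mpr h0
      have h1 : 2 ^ (Nat.size (m / 2) - 1) ≤ m / 2 := Nat.lt_size.mp (by omega)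
      have h2 : 2 ^ Nat.size (m / 2) = 2 ^ (Nat.size (m / 2) - 1) * 2 := by
        rw [← pow_succ]; congr 1; omega
      have h3 : 2 ^ Nat.size (m / 2) ≤ m := by omega
      have h4 := Nat.lt_size.mpr h3
      omega

-- the accumulator bit-length helper computes Nat.size
lemma pvBitLen_eq (n acc : Nat) : pvBitLen n acc = acc + Nat.size n := by
  rw [pvBitLen]
  split
  · next h => simp [h]
  · next h =>
    rw [pvBitLen_eq (n / 2) (acc + 1)]
    conv_rhs => rw [pv_size_div_two (show 1 ≤ n by omega)]
    omega
termination_by n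
decreasing_by omega

-- characterisation of the doubling loop: it adds the bit length of (states-1)/capacity
lemma pvLoopA_eq (states : Nat) (bits : Int) (capacity : Nat) (hc : 0 < capacity) :
    pvLoopA states bits capacity hc = bits + ((states - 1) / capacity).size := by
  rw [pvLoopA]
  split
  · next h =>
    rw [pvLoopA_eq states (bits + 1) (capacity * 2) (by omega)]
    have hdiv : (states - 1) / (capacity * 2) = ((states - 1) / capacity) / 2 :=
      (Nat.div_div_eq_div_mul _ _ _).symm
    have hm : 1 ≤ (states - 1) / capacity :=
      (Nat.one_le_div_iff hc).mpr (by omega)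
    rw [hdiv, pv_size_div_two hm]
    push_cast
    ring
  · next h =>
    have : (states - 1) / capacity = 0 := Nat.div_eq_of_lt (by omega)
    simp [this]
termination_by states - capacity
decreasing_by omega

-- ===== VERDICT (by name: the statement is the Claim_ definition above) =====
theorem equivalent_bits_for_trits_spec : Claim_equal_equivalent_bits_for_trits := by
  intro trits _
  unfold Spec_equivalent_bits_for_trits equivalent_bits_for_trits equivalent_bits_for_trits_alt
  rcases lt_trichotomy trits 0 with h | h | h
  · simp [h, le_of_lt h]
  · subst h
    rw [if_neg (by omega), if_pos (by omega), pvLoopA_eq]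
    norm_num
  · rw [if_neg (by omega), if_neg (by omega), pvLoopA_eq, pvBitLen_eq]
    simp
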